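-- pv_equiv track=rewrite | github.com/kodo-pp/mandarin | src/token_rules.py | read_base
-- ===== SOURCE A (Python) =====
-- import string
--
-- def read_base(expr):
--     id_chars = set(string.ascii_letters + string.digits + '_')
--     id_firstchars = set(string.ascii_letters + '_')
--     if len(expr) == 0 or expr[0] not in id_firstchars:
--         return None
--     for length in range(len(expr)):
--         if expr[length] not in id_chars:
--             return expr[:length] if length > 0 else None
--     return expr
-- ===== SOURCE B (Python) =====
-- import re
--
-- _ID_RE = re.compile(r'[A-Za-z_][A-Za-z0-9_]*')
--
-- def read_base(expr):
--     m = _ID_RE.match(expr)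
--     return m.group(0) if m else None
-- ===== Notes on version B (the rewrite author's own statement) =====
-- stated objective: idiomatic
-- what changed: B replaces A's per-call construction of two character sets plus an explicit first-char guard and index loop with slicing by a single precompiled anchored ASCII regex match ([A-Za-z_][A-Za-z0-9_]*) whose result is returned directly.
import Mathlib
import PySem

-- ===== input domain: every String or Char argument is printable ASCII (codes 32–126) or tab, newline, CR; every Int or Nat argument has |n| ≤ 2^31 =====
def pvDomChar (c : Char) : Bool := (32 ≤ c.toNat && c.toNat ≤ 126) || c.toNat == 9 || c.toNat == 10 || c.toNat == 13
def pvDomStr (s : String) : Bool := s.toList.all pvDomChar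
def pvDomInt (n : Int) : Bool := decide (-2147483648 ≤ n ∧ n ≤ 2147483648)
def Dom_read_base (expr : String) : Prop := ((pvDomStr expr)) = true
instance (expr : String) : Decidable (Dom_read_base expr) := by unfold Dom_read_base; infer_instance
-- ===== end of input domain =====

-- B replaces A's per-call set construction plus index loop by a single anchored regex match
-- (`[A-Za-z_][A-Za-z0-9_]*`); same return value on every string, the regex engine does the scan (idiomatic).

-- ===== PORT A =====
-- string.ascii_letters and string.digits, written out as character lists
def pyAsciiLetters : List Char := ['a', 'b', 'c', 'd', 'e', 'f', 'g', 'h', 'i', 'j', 'k', 'l', 'm', 'n', 'o', 'p', 'q', 'r', 's', 't', 'u', 'v', 'w', 'x', 'y', 'z', 'A', 'B', 'C', 'D', 'E', 'F', 'G', 'H', 'I', 'J', 'K', 'L', 'M', 'N', 'O', 'P', 'Q', 'R', 'S', 'T', 'U', 'V', 'W', 'X', 'Y', 'Z']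
def pyDigits : List Char := ['0', '1', '2', '3', '4', '5', '6', '7', '8', '9']

-- 'for length in range(len(expr)): if expr[length] not in id_chars: return expr[:length] if length > 0 else None'
-- (expr[length] is in range on every iteration; expr[:length] with 0 ≤ length is take length)
def readLoopA (id_chars : PySem.Set Char) (cs : List Char) (length : Nat) : Option (List Char) :=
  if h : length < cs.length then
    if !(id_chars.contains cs[length]) then
      if length > 0 then some (cs.take length) else none
    else readLoopA id_chars cs (length + 1)
  else some cs
termination_by cs.length - length

def read_base (expr : String) : Option String :=
  let cs := expr.toList
  let id_chars : PySem.Set Char := PySem.Set.ofList (pyAsciiLetters ++ pyDigits ++ ['_'])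
  let id_firstchars : PySem.Set Char := PySem.Set.ofList (pyAsciiLetters ++ ['_'])
  if cs.length = 0 then none
  else if !(id_firstchars.contains (cs.getD 0 ' ')) then none  -- expr[0]; index 0 in range here
  else (readLoopA id_chars cs 0).map String.ofList

-- ===== PORT B =====
-- hand port of re.match(r'[A-Za-z_][A-Za-z0-9_]*', expr): exact on all strings — the character
-- classes are explicit ASCII ranges, so the match is first-char test + greedy takeWhile
def isIdStart (c : Char) : Bool := ('A' ≤ c && c ≤ 'Z') || ('a' ≤ c && c ≤ 'z') || c == '_'
def isIdCont (c : Char) : Bool := isIdStart c || ('0' ≤ c && c ≤ '9')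

def read_base_alt (expr : String) : Option String :=
  match expr.toList with
  | [] => none
  | c :: rest => if isIdStart c then some (String.ofList (c :: rest.takeWhile isIdCont)) else none

-- ===== PRECONDITION & SPEC =====
def Spec_read_base (expr : String) (out : Option String) : Prop := out = read_base_alt expr
instance (expr : String) (out : Option String) : Decidable (Spec_read_base expr out) := by unfold Spec_read_base; infer_instance

-- ===== CLAIM (what is proved, stated in full; the proofs are below) =====
def Claim_equal_read_base : Prop := ∀ (expr : String), Dom_read_base expr → Spec_read_base expr (read_base expr)

-- ===== LEMMAS AND PROOFS =====

theorem contains_id_chars (c : Char) :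
    (PySem.Set.ofList (pyAsciiLetters ++ pyDigits ++ ['_'])).contains c = isIdCont c := by
  have h : PySem.Set.ofList (pyAsciiLetters ++ pyDigits ++ ['_']) = pyAsciiLetters ++ pyDigits ++ ['_'] :=
    PySem.Set.ofList_eq_self_of_nodup (xs := pyAsciiLetters ++ pyDigits ++ ['_']) (by decide)
  rw [h, Bool.eq_iff_iff]
  simp only [PySem.Set.contains, pyAsciiLetters, pyDigits, isIdCont, isIdStart, List.contains_eq_mem,
    List.mem_append, List.mem_cons, List.not_mem_nil, or_false,
    Char.ext_iff, Char.le_def, UInt32.le_iff_toNat_le, UInt32.toNat_inj.symm, beq_iff_eq,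
    Bool.or_eq_true, Bool.and_eq_true, decide_eq_true_eq]
  simp only [Char.reduceVal, UInt32.reduceToNat]
  omega

theorem contains_id_firstchars (c : Char) :
    (PySem.Set.ofList (pyAsciiLetters ++ ['_'])).contains c = isIdStart c := by
  have h : PySem.Set.ofList (pyAsciiLetters ++ ['_']) = pyAsciiLetters ++ ['_'] :=
    PySem.Set.ofList_eq_self_of_nodup (xs := pyAsciiLetters ++ ['_']) (by decide)
  rw [h, Bool.eq_iff_iff]
  simp only [PySem.Set.contains, pyAsciiLetters, isIdStart, List.contains_eq_mem,
    List.mem_append, List.mem_cons, List.not_mem_nil, or_false,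
    Char.ext_iff, Char.le_def, UInt32.le_iff_toNat_le, UInt32.toNat_inj.symm, beq_iff_eq,
    Bool.or_eq_true, Bool.and_eq_true, decide_eq_true_eq]
  simp only [Char.reduceVal, UInt32.reduceToNat]
  omega

-- A's loop from index i (0 < i ≤ len, all chars before i are id chars) returns the kept prefix:
-- the first i chars followed by the greedy id-char run of the rest.
theorem readLoopA_eq (cs : List Char) (i : Nat) (h0 : 0 < i) (hi : i ≤ cs.length)
    (hpre : ∀ j (hj : j < i), isIdCont (cs[j]'(by omega)) = true) :
    readLoopA (PySem.Set.ofList (pyAsciiLetters ++ pyDigits ++ ['_'])) cs i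
      = some (cs.take i ++ (cs.drop i).takeWhile isIdCont) := by
  induction hn : cs.length - i using Nat.strong_induction_on generalizing i with
  | _ n ih =>
    rw [readLoopA]
    by_cases h : i < cs.length
    · simp only [h, dif_pos, contains_id_chars]
      by_cases hc : isIdCont cs[i] = true
      · rw [hc]
        simp only [Bool.not_true, Bool.false_eq_true, if_false]
        rw [ih (cs.length - (i + 1)) (by omega) (i + 1) (by omega) (by omega)
          (by intro j hj
              by_cases hji : j < i
              · exact hpre j hji
              · have : j = i := by omega
                subst this; exact hc)
          rfl]
        congr 1
        rw [List.drop_eq_getElem_cons h]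
        rw [List.takeWhile_cons, hc]
        rw [List.take_add_one (l := cs) (i := i)]
        rw [List.getElem?_eq_getElem h]
        simp only [Option.toList_some, List.append_assoc, List.singleton_append, if_true]
      · simp only [Bool.not_eq_true] at hc
        rw [hc]
        simp only [Bool.not_false, h0, if_pos]
        congr 1
        rw [List.drop_eq_getElem_cons h, List.takeWhile_cons, hc]
        simp
    · have : i = cs.length := by omega
      subst this
      simp

-- ===== VERDICT (by name: the statement is the Claim_ definition above) =====
theorem read_base_spec : Claim_equal_read_base := by
  intro expr _
  unfold Spec_read_base read_base read_base_alt
  simp only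
  cases hcs : expr.toList with
  | nil => simp
  | cons c rest =>
    simp only [List.length_cons, Nat.succ_ne_zero, if_false, List.getD_cons_zero,
      contains_id_firstchars]
    by_cases hs : isIdStart c = true
    · simp only [hs, Bool.not_true, Bool.false_eq_true, if_false, if_true]
      rw [readLoopA]
      simp only [List.length_cons, Nat.zero_lt_succ, dif_pos, List.getElem_cons_zero,
        contains_id_chars]
      have hc : isIdCont c = true := by simp [isIdCont, hs]
      rw [hc]
      simp only [Bool.not_true, Bool.false_eq_true, if_false]
      rw [readLoopA_eq (c :: rest) 1 (by omega) (by simp) (by intro j hj; interval_cases j; simpa)]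
      simp
    · simp [hs]
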